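-- pv_equiv track=rewrite | github.com/artecs-group/RL_MIG_scheduler | visual_scheduler/utils.py | _num_task_to_times
-- ===== SOURCE A (Python) =====
-- def _num_task_to_times(numbered_tasks):
--     dic_cont, dic_discrete = {}, {}
--     for num, task in numbered_tasks:
--         if num not in dic_cont:
--             dic_cont[num] = [[time_c for time_c, _ in task]]
--             dic_discrete[num] = [time_d for _, time_d in task]
--         else:
--             dic_cont[num].append([time_c for time_c, _ in task])
--     return dic_cont, dic_discrete
-- ===== SOURCE B (Python) =====
-- def _num_task_to_times(numbered_tasks):
--     # Two-pass: first group tasks by num in encounter order, then derive both dicts.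
--     groups = {}
--     for num, task in numbered_tasks:
--         groups.setdefault(num, []).append(task)
--     dic_cont = {num: [[time_c for time_c, _ in task] for task in tasks]
--                 for num, tasks in groups.items()}
--     dic_discrete = {num: [time_d for _, time_d in tasks[0]]
--                     for num, tasks in groups.items()}
--     return dic_cont, dic_discrete
-- ===== Notes on version B (the rewrite author's own statement) =====
-- stated objective: alternative
-- what changed: Replaces A's single interleaved pass that conditionally builds both result dicts with a two-phase decomposition: one pass groups tasks per num in encounter order, then both dicts are derived from that grouping (discrete times from the first task of each group).
import Mathlib
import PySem

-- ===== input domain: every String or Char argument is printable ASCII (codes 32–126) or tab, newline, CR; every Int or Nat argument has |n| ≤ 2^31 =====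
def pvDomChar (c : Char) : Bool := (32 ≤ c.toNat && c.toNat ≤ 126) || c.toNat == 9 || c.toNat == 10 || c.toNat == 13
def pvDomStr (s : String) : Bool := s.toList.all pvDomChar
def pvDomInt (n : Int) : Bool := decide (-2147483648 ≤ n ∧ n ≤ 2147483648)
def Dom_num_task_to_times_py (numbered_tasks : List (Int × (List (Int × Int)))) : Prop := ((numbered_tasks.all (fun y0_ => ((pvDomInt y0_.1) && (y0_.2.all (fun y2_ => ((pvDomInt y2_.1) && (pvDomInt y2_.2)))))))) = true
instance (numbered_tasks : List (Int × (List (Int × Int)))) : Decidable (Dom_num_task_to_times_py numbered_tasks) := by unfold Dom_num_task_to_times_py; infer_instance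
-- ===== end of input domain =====

-- B replaces A's interleaved single pass by a group-then-transform decomposition (alternative, same cost).

-- ===== PORT A =====
-- one pass building both dicts; 'dic_cont[num].append(x)' is 'modify num [] (· ++ [x])'
def num_task_to_times_py (numbered_tasks : List (Int × (List (Int × Int)))) : (List (Int × List (List Int))) × (List (Int × List Int)) :=
  let cd := numbered_tasks.foldl
    (fun (cd : PySem.Dict Int (List (List Int)) × PySem.Dict Int (List Int)) p =>
      if cd.1.contains p.1 = false then
        (cd.1.insert p.1 [p.2.map Prod.fst], cd.2.insert p.1 (p.2.map Prod.snd))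
      else
        (cd.1.modify p.1 [] (· ++ [p.2.map Prod.fst]), cd.2))
    (PySem.Dict.empty, PySem.Dict.empty)
  (cd.1.items, cd.2.items)

-- ===== PORT B =====
-- 'groups.setdefault(num, []).append(task)' is 'modify num [] (· ++ [task])';
-- 'tasks[0]' is exact as headI: every group value is nonempty by construction.
def num_task_to_times_py_alt (numbered_tasks : List (Int × (List (Int × Int)))) : (List (Int × List (List Int))) × (List (Int × List Int)) :=
  let groups := numbered_tasks.foldl
    (fun (g : PySem.Dict Int (List (List (Int × Int)))) p => g.modify p.1 [] (· ++ [p.2]))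
    PySem.Dict.empty
  (groups.items.map (fun q => (q.1, q.2.map (fun task => task.map Prod.fst))),
   groups.items.map (fun q => (q.1, q.2.headI.map Prod.snd)))

-- ===== PRECONDITION & SPEC =====
def Spec_num_task_to_times_py (numbered_tasks : List (Int × (List (Int × Int)))) (out : (List (Int × List (List Int))) × (List (Int × List Int))) : Prop := out = num_task_to_times_py_alt numbered_tasks
instance (numbered_tasks : List (Int × (List (Int × Int)))) (out : (List (Int × List (List Int))) × (List (Int × List Int))) : Decidable (Spec_num_task_to_times_py numbered_tasks out) := by unfold Spec_num_task_to_times_py; infer_instance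

-- ===== CLAIM (what is proved, stated in full; the proofs are below) =====
def Claim_equal_num_task_to_times_py : Prop := ∀ (numbered_tasks : List (Int × (List (Int × Int)))), Dom_num_task_to_times_py numbered_tasks → Spec_num_task_to_times_py numbered_tasks (num_task_to_times_py numbered_tasks)

-- ===== LEMMAS AND PROOFS =====

-- map a function over the VALUES of a dict, keeping keys and order
def pvMapVal {ν ν' : Type} (φ : ν → ν') (g : PySem.Dict Int ν) : PySem.Dict Int ν' :=
  PySem.Dict.mk (g.items.map (fun p => (p.1, φ p.2)))

theorem pvMapVal_contains {ν ν' : Type} (φ : ν → ν') (g : PySem.Dict Int ν) (k : Int) :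
    (pvMapVal φ g).contains k = g.contains k := by
  simp [pvMapVal, PySem.Dict.contains, List.any_map, Function.comp_def]

theorem pvMapVal_get? {ν ν' : Type} (φ : ν → ν') (g : PySem.Dict Int ν) (k : Int) :
    (pvMapVal φ g).get? k = (g.get? k).map φ := by
  simp [pvMapVal, PySem.Dict.get?, List.find?_map, Function.comp_def]

theorem pvMapVal_getD {ν ν' : Type} (φ : ν → ν') (g : PySem.Dict Int ν) (k : Int) (d0 : ν) :
    (pvMapVal φ g).getD k (φ d0) = φ (g.getD k d0) := by
  simp only [PySem.Dict.getD, pvMapVal_get?]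
  cases g.get? k <;> simp

theorem pvMapVal_insert {ν ν' : Type} (φ : ν → ν') (g : PySem.Dict Int ν) (k : Int) (v : ν) :
    pvMapVal φ (g.insert k v) = (pvMapVal φ g).insert k (φ v) := by
  apply PySem.Dict.ext
  simp only [PySem.Dict.insert, pvMapVal_contains]
  by_cases h : g.contains k = true
  · simp only [h, if_pos]
    simp only [pvMapVal, List.map_map]
    congr 1; funext p
    by_cases hk : (p.1 == k) = true <;> simp [Function.comp, hk]
  · simp only [h]
    simp [pvMapVal]

theorem pvMapVal_keys {ν ν' : Type} (φ : ν → ν') (g : PySem.Dict Int ν) :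
    (pvMapVal φ g).keys = g.keys := by
  simp [pvMapVal, PySem.Dict.keys, List.map_map, Function.comp]

-- inserting a key's current value back is a no-op (nodup keys, key present)
theorem pv_insert_self_of_contains {ν : Type} (g : PySem.Dict Int ν) (k : Int) (d0 : ν)
    (hc : g.contains k = true) (hnd : g.keys.Nodup) :
    g.insert k (g.getD k d0) = g := by
  apply PySem.Dict.ext
  rw [PySem.Dict.items_insert_of_contains _ _ hc]
  conv_rhs => rw [← List.map_id g.items]
  apply List.map_congr_left
  intro p hp
  by_cases hk : (p.1 == k) = true
  · simp only [hk, if_pos, id]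
    have hk' : p.1 = k := by simpa using hk
    have : g.getD k d0 = p.2 := by
      have := PySem.Dict.getD_of_mem_items g (k := k) (v := p.2) (by rw [← hk']; exact hp) hnd d0
      exact this
    rw [this, ← hk']
  · simp [hk, id]

theorem pv_getD_ne_nil {ν : Type} (g : PySem.Dict Int (List ν)) (k : Int)
    (hc : g.contains k = true) (hnd : g.keys.Nodup)
    (hne : ∀ p ∈ g.items, p.2 ≠ []) :
    g.getD k [] ≠ [] := by
  have : (g.get? k).isSome := by
    simpa [PySem.Dict.get?, List.isSome_find?, PySem.Dict.contains] using hc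
  rcases Option.isSome_iff_exists.mp this with ⟨v, hv⟩
  have hmem : (k, v) ∈ g.items := PySem.Dict.mem_items_of_get?_eq_some g hv
  have : g.getD k [] = v := PySem.Dict.getD_of_mem_items g hmem hnd []
  rw [this]
  exact hne _ hmem

-- the A-side fold state is the image of the B-side grouping under two value maps
theorem pv_fold_eq (l : List (Int × (List (Int × Int)))) :
    ∀ (g : PySem.Dict Int (List (List (Int × Int)))),
    g.keys.Nodup → (∀ p ∈ g.items, p.2 ≠ []) →
    l.foldl
      (fun (cd : PySem.Dict Int (List (List Int)) × PySem.Dict Int (List Int)) p =>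
        if cd.1.contains p.1 = false then
          (cd.1.insert p.1 [p.2.map Prod.fst], cd.2.insert p.1 (p.2.map Prod.snd))
        else
          (cd.1.modify p.1 [] (· ++ [p.2.map Prod.fst]), cd.2))
      (pvMapVal (fun ts => ts.map (fun task => task.map Prod.fst)) g,
       pvMapVal (fun ts => ts.headI.map Prod.snd) g)
    =
    (pvMapVal (fun ts => ts.map (fun task => task.map Prod.fst))
        (l.foldl (fun g p => g.modify p.1 [] (· ++ [p.2])) g),
     pvMapVal (fun ts => ts.headI.map Prod.snd)
        (l.foldl (fun g p => g.modify p.1 [] (· ++ [p.2])) g)) := by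
  induction l with
  | nil => intro g _ _; rfl
  | cons p l ih =>
    intro g hnd hne
    simp only [List.foldl_cons]
    have hB : g.modify p.1 [] (· ++ [p.2]) = g.insert p.1 (g.getD p.1 [] ++ [p.2]) := rfl
    have hnd' : (g.modify p.1 [] (· ++ [p.2])).keys.Nodup := by
      rw [PySem.Dict.keys_modify]
      exact PySem.Dict.nodup_keys_insert _ _ _ hnd
    have hne' : ∀ q ∈ (g.modify p.1 [] (· ++ [p.2])).items, q.2 ≠ [] := by
      intro q hq
      rw [hB] at hq
      rcases (PySem.Dict.mem_items_insert _ _ _ _).mp hq with h | ⟨hq', _⟩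
      · subst h; simp
      · exact hne _ hq'
    rw [← ih (g.modify p.1 [] (· ++ [p.2])) hnd' hne']
    congr 1
    by_cases hc : g.contains p.1 = true
    · -- key already present: A appends to dic_cont, leaves dic_discrete
      have hc1 : (pvMapVal (fun ts => ts.map (fun task => task.map Prod.fst)) g).contains p.1 = true := by
        rw [pvMapVal_contains]; exact hc
      have hc2 : (pvMapVal (fun ts => ts.headI.map Prod.snd) g).contains p.1 = true := by
        rw [pvMapVal_contains]; exact hc
      have hnd2 : (pvMapVal (fun ts => ts.headI.map Prod.snd) g).keys.Nodup := by
        rw [pvMapVal_keys]; exact hnd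
      simp only [hc1, Bool.true_eq_false, if_false]
      have hne0 : g.getD p.1 [] ≠ [] := pv_getD_ne_nil g p.1 hc hnd hne
      have hhead : (g.getD p.1 [] ++ [p.2]).headI = (g.getD p.1 []).headI := by
        cases h : g.getD p.1 [] with
        | nil => exact absurd h hne0
        | cons a as => simp
      rw [hB, pvMapVal_insert, pvMapVal_insert, hhead]
      have hv : List.map Prod.snd (g.getD p.1 []).headI =
          (pvMapVal (fun ts => ts.headI.map Prod.snd) g).getD p.1 [] := by
        have := pvMapVal_getD (fun ts => ts.headI.map Prod.snd) g p.1 []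
        simpa using this.symm
      rw [hv, pv_insert_self_of_contains _ _ _ hc2 hnd2]
      have hgd : (pvMapVal (fun ts => ts.map (fun task => task.map Prod.fst)) g).getD p.1 [] =
          List.map (fun ts => List.map Prod.fst ts) (g.getD p.1 []) := by
        simpa using pvMapVal_getD (fun ts => ts.map (fun task => task.map Prod.fst)) g p.1 []
      simp only [PySem.Dict.modify, hgd, List.map_append, List.map_cons, List.map_nil]
    · -- new key
      have hc1 : (pvMapVal (fun ts => ts.map (fun task => task.map Prod.fst)) g).contains p.1 = false := by
        rw [pvMapVal_contains]; simpa using hc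
      simp only [hc1, if_pos]
      have hg0 : g.getD p.1 [] = [] := by
        apply PySem.Dict.getD_of_not_contains
        simpa using hc
      rw [hB, hg0]
      simp only [List.nil_append]
      rw [pvMapVal_insert, pvMapVal_insert]
      rw [Prod.ext_iff]
      constructor <;> simp

-- ===== VERDICT (by name: the statement is the Claim_ definition above) =====
theorem num_task_to_times_py_spec : Claim_equal_num_task_to_times_py := by
  intro nts _
  unfold Spec_num_task_to_times_py num_task_to_times_py num_task_to_times_py_alt
  have h := pv_fold_eq nts PySem.Dict.empty (by simp [PySem.Dict.keys_empty]) (by simp [PySem.Dict.empty])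
  have he : (PySem.Dict.empty : PySem.Dict Int (List (List Int))) = pvMapVal (fun ts => ts.map (fun task => task.map Prod.fst)) (PySem.Dict.empty : PySem.Dict Int (List (List (Int × Int)))) := rfl
  have he2 : (PySem.Dict.empty : PySem.Dict Int (List Int)) = pvMapVal (fun ts => ts.headI.map Prod.snd) (PySem.Dict.empty : PySem.Dict Int (List (List (Int × Int)))) := rfl
  simp only []
  rw [he, he2, h]
  rfl
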